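-- pv_equiv track=rewrite | github.com/surajkumar19/HackerRank | Master/Funny String.py | funnyString
-- ===== SOURCE A (Python) =====
-- def funnyString(s):
--     # Complete this function
--     r=s[::-1]
--     for i in range(1,len(s)):
--         if abs(ord(s[i])-ord(s[i-1]))==abs(ord(r[i])-ord(r[i-1])):
--             pass
--         else :
--             return 'Not Funny'
--             break
--     return 'Funny'
-- ===== SOURCE B (Python) =====
-- def funnyString(s):
--     # Two-pointer scan: compare the i-th adjacent difference with its mirror
--     # directly on s, walking inward from both ends; no reversed copy, no list.
--     i, j = 1, len(s) - 1
--     while i <= j: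
--         if abs(ord(s[i]) - ord(s[i - 1])) != abs(ord(s[j]) - ord(s[j - 1])):
--             return 'Not Funny'
--         i += 1
--         j -= 1
--     return 'Funny'
-- ===== Notes on version B (the rewrite author's own statement) =====
-- stated objective: alternative
-- what changed: B uses a two-pointer inward scan on s itself, comparing the i-th adjacent difference with its mirror difference directly and stopping at the middle, instead of A's full-length loop over s against a materialised reversed copy.
import Mathlib
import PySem

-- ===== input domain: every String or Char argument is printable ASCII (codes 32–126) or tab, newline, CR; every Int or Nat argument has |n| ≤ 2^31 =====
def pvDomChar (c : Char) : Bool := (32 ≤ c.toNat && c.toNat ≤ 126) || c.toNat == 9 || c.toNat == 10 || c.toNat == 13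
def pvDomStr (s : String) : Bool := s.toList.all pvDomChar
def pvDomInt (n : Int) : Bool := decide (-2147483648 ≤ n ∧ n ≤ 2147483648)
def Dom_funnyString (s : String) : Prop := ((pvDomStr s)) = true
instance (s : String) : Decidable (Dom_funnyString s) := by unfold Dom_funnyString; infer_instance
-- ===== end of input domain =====

-- B replaces A's full loop over s against a reversed copy by a two-pointer
-- inward scan on s itself (no reversed string, half the iterations); objective: alternative.

-- ===== PORT A =====
-- abs(ord(x[i]) - ord(x[i-1]))'s operand: ord of the char at index i; the indices reached
-- by the loops are always in range, so pyGetD is exact here.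
def pvOrdAt (l : List Char) (i : Int) : Int := ((PySem.List.pyGetD l i ' ').toNat : Int)

-- the 'for i in range(1, len(s))' loop with its early 'return "Not Funny"'
def pvLoopA (sl r : List Char) : List Int → String
  | [] => "Funny"
  | i :: rest =>
    if |pvOrdAt sl i - pvOrdAt sl (i - 1)| = |pvOrdAt r i - pvOrdAt r (i - 1)| then
      pvLoopA sl r rest
    else "Not Funny"

-- r = s[::-1] is the reverse
def funnyString (s : String) : String :=
  let sl := s.toList
  let r := sl.reverse
  pvLoopA sl r (PySem.List.pyRange 1 sl.length 1)

-- ===== PORT B =====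
-- the 'while i <= j' two-pointer loop of Source B
def pvLoopB (sl : List Char) (i j : Int) : String :=
  if _h : i ≤ j then
    if |pvOrdAt sl i - pvOrdAt sl (i - 1)| ≠ |pvOrdAt sl j - pvOrdAt sl (j - 1)| then
      "Not Funny"
    else
      pvLoopB sl (i + 1) (j - 1)
  else "Funny"
termination_by (j - i + 1).toNat
decreasing_by omega

def funnyString_alt (s : String) : String :=
  let sl := s.toList
  pvLoopB sl 1 ((sl.length : Int) - 1)

-- ===== PRECONDITION & SPEC =====
def Spec_funnyString (s : String) (out : String) : Prop := out = funnyString_alt s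
instance (s : String) (out : String) : Decidable (Spec_funnyString s out) := by unfold Spec_funnyString; infer_instance

-- ===== CLAIM (what is proved, stated in full; the proofs are below) =====
def Claim_equal_funnyString : Prop := ∀ (s : String), Dom_funnyString s → Spec_funnyString s (funnyString s)

-- ===== LEMMAS AND PROOFS =====

-- the adjacent difference ending at position m
def pvE (sl : List Char) (m : Int) : Int := |pvOrdAt sl m - pvOrdAt sl (m - 1)|

theorem pvOrdAt_natCast (l : List Char) (k : Nat) :
    pvOrdAt l (k : Int) = ((l.getD k ' ').toNat : Int) := by
  simp [pvOrdAt]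

-- getD on a reverse, inside the length
theorem getD_reverse (l : List Char) (j : Nat) (d : Char) (hj : j < l.length) :
    l.reverse.getD j d = l.getD (l.length - 1 - j) d := by
  rw [List.getD_eq_getElem l.reverse d (by simpa using hj),
      List.getD_eq_getElem l d (by omega), List.getElem_reverse]

-- the loop of A computes the universally-quantified condition
theorem pvLoopA_eq (sl r : List Char) (idxs : List Int) :
    pvLoopA sl r idxs =
      if (∀ i ∈ idxs, |pvOrdAt sl i - pvOrdAt sl (i - 1)| = |pvOrdAt r i - pvOrdAt r (i - 1)|)
      then "Funny" else "Not Funny" := by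
  induction idxs with
  | nil => simp [pvLoopA]
  | cons i rest ih =>
    by_cases h : |pvOrdAt sl i - pvOrdAt sl (i - 1)| = |pvOrdAt r i - pvOrdAt r (i - 1)|
    · simp [pvLoopA, h, ih]
    · simp [pvLoopA, h]

-- the two-pointer loop of B computes the mirrored-pairs condition over [i, j]
theorem pvLoopB_eq (sl : List Char) (i j : Int) :
    pvLoopB sl i j =
      if (∀ m : Int, i ≤ m → m ≤ j → pvE sl m = pvE sl (i + j - m))
      then "Funny" else "Not Funny" := by
  fun_induction pvLoopB sl i j with
  | case1 i j hij hne =>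
    rw [if_neg]
    intro hall
    exact hne (by simpa using hall i le_rfl hij)
  | case2 i j hij hne ih =>
    rw [not_not] at hne
    rw [ih]
    apply if_congr _ rfl rfl
    constructor
    · intro h m hm1 hm2
      rcases eq_or_lt_of_le hm1 with he | hlt
      · subst he; simpa [pvE] using hne
      rcases eq_or_lt_of_le hm2 with he | hlt2
      · rw [he, show i + j - j = i by omega]
        simpa [pvE] using hne.symm
      · have := h m (by omega) (by omega)
        have e : i + 1 + (j - 1) - m = i + j - m := by omega
        rwa [e] at this
    · intro h m hm1 hm2
      have := h m (by omega) (by omega)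
      have e : i + 1 + (j - 1) - m = i + j - m := by omega
      rw [e]; exact this
  | case3 i j hij => rw [if_pos]; intro m hm1 hm2; omega

-- the reversed string's difference at index 1+k is s's difference at n-1-k
theorem rev_diff (sl : List Char) (k : Nat) (hk : k < sl.length - 1) :
    |pvOrdAt sl.reverse ((1 : Int) + k) - pvOrdAt sl.reverse ((1 : Int) + k - 1)| =
      pvE sl ((sl.length : Int) - 1 - k) := by
  have h1 : ((1 : Int) + k) = ((k + 1 : Nat) : Int) := by omega
  have h2 : ((1 : Int) + k - 1) = ((k : Nat) : Int) := by omega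
  rw [h2, h1, pvOrdAt_natCast, pvOrdAt_natCast,
      getD_reverse sl (k + 1) ' ' (by omega), getD_reverse sl k ' ' (by omega)]
  have h3 : ((sl.length : Int) - 1 - k) = ((sl.length - 1 - k : Nat) : Int) := by omega
  have h4 : ((sl.length : Int) - 1 - k - 1) = ((sl.length - 1 - (k + 1) : Nat) : Int) := by omega
  rw [pvE, h4, h3, pvOrdAt_natCast, pvOrdAt_natCast, abs_sub_comm]

-- the condition A checks coincides with the condition B checks
theorem cond_iff (sl : List Char) :
    (∀ i ∈ PySem.List.pyRange 1 sl.length 1,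
        |pvOrdAt sl i - pvOrdAt sl (i - 1)| =
          |pvOrdAt sl.reverse i - pvOrdAt sl.reverse (i - 1)|) ↔
    (∀ m : Int, 1 ≤ m → m ≤ (sl.length : Int) - 1 →
        pvE sl m = pvE sl (1 + ((sl.length : Int) - 1) - m)) := by
  have hrange : PySem.List.pyRange 1 (sl.length : Int) 1 =
      (List.range (sl.length - 1)).map (fun k : Nat => (1 : Int) + k) := by
    have ht : (((sl.length : Int)) - 1).toNat = sl.length - 1 := by omega
    rw [PySem.List.pyRange_one, ht]
  rw [hrange]
  simp only [List.mem_map, List.mem_range]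
  constructor
  · intro h m hm1 hm2
    have hk : m = (1 : Int) + ((m - 1).toNat : Int) := by omega
    have hklt : (m - 1).toNat < sl.length - 1 := by omega
    have h0 := h m ⟨(m - 1).toNat, hklt, hk.symm⟩
    rw [hk, rev_diff sl _ hklt] at h0
    have e1 : (1 : Int) + ((sl.length : Int) - 1) - m = (sl.length : Int) - 1 - ((m - 1).toNat : Int) := by omega
    rw [← hk] at h0
    rw [e1]
    exact h0
  · intro h i hi
    obtain ⟨k, hk, rfl⟩ := hi
    have h0 := h ((1 : Int) + k) (by omega) (by omega)
    have e1 : (1 : Int) + ((sl.length : Int) - 1) - ((1 : Int) + k) = (sl.length : Int) - 1 - k := by omega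
    rw [e1] at h0
    rw [rev_diff sl k hk]
    exact h0

-- ===== VERDICT (by name: the statement is the Claim_ definition above) =====
theorem funnyString_spec : Claim_equal_funnyString := by
  intro s _
  show pvLoopA s.toList s.toList.reverse (PySem.List.pyRange 1 s.toList.length 1) =
    pvLoopB s.toList 1 ((s.toList.length : Int) - 1)
  rw [pvLoopA_eq, pvLoopB_eq]
  exact if_congr (cond_iff s.toList) rfl rfl
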